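-- pv_equiv track=rewrite | github.com/jjkiljanski/railway_history_pl_1842_1939 | tests/test_base_for_line_build.py | _extract_station_name_field
-- ===== SOURCE A (Python) =====
-- from typing import Iterable, List, Set
--
-- def _extract_station_name_field(header_fields: Iterable[str]) -> str:
--     """
--     Detects which column holds the station name in the stations DB.
--     Common options: name, station, station_name.
--     """
--     fields = [h.strip() for h in header_fields if h]
--     lower = {h.casefold(): h for h in fields}
--
--     for key in ("name", "station_name", "station"):
--         if key in lower:
--             return lower[key]
--
--     raise AssertionError(
--         "Could not detect station name column in stations DB. "
--         f"Found columns: {fields}. Expected one of: name, station_name, station."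
--     )
-- ===== SOURCE B (Python) =====
-- _CANDIDATES = ("name", "station_name", "station")
--
-- def _extract_station_name_field(header_fields):
--     """
--     Detects which column holds the station name in the stations DB.
--     Single pass: track the best-ranked candidate column seen so far.
--     """
--     fields = [h.strip() for h in header_fields if h]
--     best_rank = len(_CANDIDATES)
--     best_field = None
--     for f in fields:
--         try:
--             rank = _CANDIDATES.index(f.casefold())
--         except ValueError:
--             continue
--         if rank < best_rank:
--             best_rank, best_field = rank, f
--     if best_field is not None:
--         return best_field
--     raise AssertionError(
--         "Could not detect station name column in stations DB. "
--         f"Found columns: {fields}. Expected one of: name, station_name, station."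
--     )
-- ===== Notes on version B (the rewrite author's own statement) =====
-- stated objective: alternative
-- what changed: B replaces A's casefold->field dict plus three ordered lookups with a single pass over the fields keeping the best-ranked candidate seen so far; Pre_ excludes inputs with no matching field (A raises AssertionError) and inputs where the winning key is matched by two differently-spelled fields, where A's dict-overwrite last-wins choice is an accidental tie-break (B keeps the first).
-- outside the precondition, e.g. on _extract_station_name_field(['Name ', 'NAME']): A returns 'NAME', B returns 'Name'
import Mathlib
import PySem

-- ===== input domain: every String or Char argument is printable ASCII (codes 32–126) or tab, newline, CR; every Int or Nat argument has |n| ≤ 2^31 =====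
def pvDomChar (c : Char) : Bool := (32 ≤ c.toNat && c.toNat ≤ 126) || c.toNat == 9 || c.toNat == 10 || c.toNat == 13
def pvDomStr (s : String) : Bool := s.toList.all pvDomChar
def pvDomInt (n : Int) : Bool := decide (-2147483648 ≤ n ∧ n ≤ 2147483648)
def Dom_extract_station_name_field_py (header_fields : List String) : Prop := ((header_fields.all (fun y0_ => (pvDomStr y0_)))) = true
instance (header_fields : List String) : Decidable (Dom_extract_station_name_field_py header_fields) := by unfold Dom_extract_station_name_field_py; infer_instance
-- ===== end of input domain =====

-- B replaces A's casefold->field dict plus three ordered lookups with a single pass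
-- that keeps the best-ranked candidate column seen so far (alternative decomposition).


-- ===== PORT A =====
-- fields = [h.strip() for h in header_fields if h]; lower = {h.casefold(): h for h in fields}
-- (casefold = lower on the ASCII domain); then the three lookups in order; the final
-- 'raise AssertionError' is outside Pre_ — the port returns "" there.
def extract_station_name_field_py (header_fields : List String) : String :=
  let fields := (header_fields.filter (fun h => h ≠ "")).map PySem.Str.strip
  let lower := fields.foldl (fun d h => d.insert (PySem.Str.lower h) h) PySem.Dict.empty
  match lower.get? "name" with
  | some v => v
  | none =>
    match lower.get? "station_name" with
    | some v => v
    | none =>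
      match lower.get? "station" with
      | some v => v
      | none => ""  -- raise AssertionError: excluded by Pre_

-- ===== PORT B =====
-- _CANDIDATES = ("name", "station_name", "station")
def pvCands : List String := ["name", "station_name", "station"]

-- loop body: rank = _CANDIDATES.index(f.casefold()) (ValueError -> skip);
-- if rank < best_rank: best_rank, best_field = rank, f
def pvBStep (st : Int × Option String) (f : String) : Int × Option String :=
  match PySem.List.index? pvCands (PySem.Str.lower f) with
  | none => st
  | some r => if (r : Int) < st.1 then ((r : Int), some f) else st

def extract_station_name_field_py_alt (header_fields : List String) : String :=
  let fields := (header_fields.filter (fun h => h ≠ "")).map PySem.Str.strip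
  let res := fields.foldl pvBStep ((pvCands.length : Int), none)
  match res.2 with
  | some v => v
  | none => ""  -- raise AssertionError: excluded by Pre_

-- ===== PRECONDITION & SPEC =====
def pvFields (header_fields : List String) : List String :=
  (header_fields.filter (fun h => h ≠ "")).map PySem.Str.strip

def pvHasK (k : String) (fs : List String) : Prop := ∃ f ∈ fs, PySem.Str.lower f = k

def pvUniq (k : String) (fs : List String) : Prop :=
  ∀ f ∈ fs, ∀ g ∈ fs, PySem.Str.lower f = k → PySem.Str.lower g = k → f = g

-- Pre_ excludes (a) inputs on which no field matches any candidate key — there A raises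
-- AssertionError (and so does B) — and (b) inputs on which the winning key is matched by
-- two differently-spelled fields, where A's dict-overwrite last-wins choice is an
-- accidental tie-break (B keeps the first such field).
def Pre_extract_station_name_field_py (header_fields : List String) : Prop :=
  (pvHasK "name" (pvFields header_fields) ∧ pvUniq "name" (pvFields header_fields)) ∨
  (¬ pvHasK "name" (pvFields header_fields) ∧
    pvHasK "station_name" (pvFields header_fields) ∧ pvUniq "station_name" (pvFields header_fields)) ∨
  (¬ pvHasK "name" (pvFields header_fields) ∧ ¬ pvHasK "station_name" (pvFields header_fields) ∧
    pvHasK "station" (pvFields header_fields) ∧ pvUniq "station" (pvFields header_fields))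
instance (header_fields : List String) : Decidable (Pre_extract_station_name_field_py header_fields) := by
  unfold Pre_extract_station_name_field_py pvHasK pvUniq; infer_instance

def pvWitness_extract_station_name_field_py : List String := ["id", " Name "]

def Spec_extract_station_name_field_py (header_fields : List String) (out : String) : Prop := out = extract_station_name_field_py_alt header_fields
instance (header_fields : List String) (out : String) : Decidable (Spec_extract_station_name_field_py header_fields out) := by unfold Spec_extract_station_name_field_py; infer_instance

-- ===== CLAIM (what is proved, stated in full; the proofs are below) =====
def Claim_equal_extract_station_name_field_py : Prop := ∀ (header_fields : List String), Dom_extract_station_name_field_py header_fields → Pre_extract_station_name_field_py header_fields → Spec_extract_station_name_field_py header_fields (extract_station_name_field_py header_fields)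

-- ===== LEMMAS AND PROOFS =====

-- first casefold match (B's effective choice per key) and last casefold match (A's
-- dict-overwrite choice per key)
def pvFirstM (k : String) (fs : List String) : Option String :=
  fs.find? (fun f => PySem.Str.lower f == k)

def pvLastStep (k : String) (acc : Option String) (f : String) : Option String :=
  if PySem.Str.lower f == k then some f else acc

-- lookup in A's insert-loop dict = last casefold match
theorem pv_get?_foldl_insert (fields : List String) (d0 : PySem.Dict String String) (k : String) :
    (fields.foldl (fun d h => d.insert (PySem.Str.lower h) h) d0).get? k =
      fields.foldl (pvLastStep k) (d0.get? k) := by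
  induction fields generalizing d0 with
  | nil => rfl
  | cons h t ih =>
      simp only [List.foldl_cons]
      rw [ih]
      by_cases hk : PySem.Str.lower h = k
      · subst hk
        simp [PySem.Dict.get?_insert_self, pvLastStep]
      · rw [PySem.Dict.get?_insert_of_ne _ _ (Ne.symm hk)]
        simp [pvLastStep, hk]

theorem pv_last_mem (k : String) (fs : List String) :
    ∀ (a v : Option String), fs.foldl (pvLastStep k) a = v →
      v = a ∨ ∃ f, v = some f ∧ f ∈ fs ∧ PySem.Str.lower f = k := by
  induction fs with
  | nil => intro a v h; exact Or.inl h.symm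
  | cons f t ih =>
      intro a v h
      simp only [List.foldl_cons, pvLastStep] at h
      by_cases hf : PySem.Str.lower f = k
      · simp only [hf, beq_self_eq_true, if_true] at h
        rcases ih _ _ h with h1 | ⟨g, hg, hm, hl⟩
        · exact Or.inr ⟨f, h1, by simp, hf⟩
        · exact Or.inr ⟨g, hg, List.mem_cons_of_mem _ hm, hl⟩
      · simp only [beq_iff_eq, hf, if_false] at h
        rcases ih _ _ h with h1 | ⟨g, hg, hm, hl⟩
        · exact Or.inl h1
        · exact Or.inr ⟨g, hg, List.mem_cons_of_mem _ hm, hl⟩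

theorem pv_last_some (k : String) (fs : List String) :
    ∀ a : String, (fs.foldl (pvLastStep k) (some a)).isSome := by
  induction fs with
  | nil => intro a; rfl
  | cons f t ih =>
      intro a
      simp only [List.foldl_cons, pvLastStep]
      split
      · exact ih f
      · exact ih a

theorem pv_last_none_iff (k : String) (fs : List String) :
    fs.foldl (pvLastStep k) none = none ↔ ¬ pvHasK k fs := by
  induction fs with
  | nil => simp [pvHasK]
  | cons f t ih =>
      simp only [List.foldl_cons, pvLastStep]
      by_cases hf : PySem.Str.lower f = k
      · simp only [hf, beq_self_eq_true, if_true]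
        have hs := pv_last_some k t f
        constructor
        · intro h; rw [h] at hs; simp at hs
        · intro h; exact ((h ⟨f, by simp, hf⟩).elim)
      · rw [if_neg (by simp [hf])]
        rw [ih]
        unfold pvHasK
        simp [hf]

theorem pv_first_none_iff (k : String) (fs : List String) :
    pvFirstM k fs = none ↔ ¬ pvHasK k fs := by
  simp [pvFirstM, List.find?_eq_none, pvHasK]

theorem pv_first_mem (k : String) (fs : List String) (v : String)
    (h : pvFirstM k fs = some v) : v ∈ fs ∧ PySem.Str.lower v = k := by
  refine ⟨List.mem_of_find?_eq_some h, ?_⟩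
  have := List.find?_some h
  simpa using this

-- under uniqueness of the spelling of key k, last match = first match
theorem pv_last_eq_first (k : String) (fs : List String) (hu : pvUniq k fs) :
    fs.foldl (pvLastStep k) none = pvFirstM k fs := by
  cases hv : pvFirstM k fs with
  | none =>
      rw [pv_last_none_iff]
      exact (pv_first_none_iff k fs).mp hv
  | some w =>
      obtain ⟨hwm, hwl⟩ := pv_first_mem k fs w hv
      cases hl : fs.foldl (pvLastStep k) none with
      | none =>
          exact absurd ⟨w, hwm, hwl⟩ ((pv_last_none_iff k fs).mp hl)
      | some v =>
          rcases pv_last_mem k fs none _ hl with h1 | ⟨g, hg, hm, hlo⟩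
          · cases h1
          · cases hg
            rw [hu _ hm _ hwm hlo hwl]

-- characterization of B's fold (state (r, o))
theorem pv_foldB (fs : List String) :
    ∀ (r : Int) (o : Option String),
      (fs.foldl pvBStep (r, o)).2 =
        if 0 < r ∧ (pvFirstM "name" fs).isSome then pvFirstM "name" fs
        else if 1 < r ∧ (pvFirstM "station_name" fs).isSome then pvFirstM "station_name" fs
        else if 2 < r ∧ (pvFirstM "station" fs).isSome then pvFirstM "station" fs
        else o := by
  induction fs with
  | nil => intro r o; simp [pvFirstM]
  | cons f t ih =>
      intro r o
      simp only [List.foldl_cons]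
      by_cases h0 : PySem.Str.lower f = "name"
      · have hi : PySem.List.index? pvCands (PySem.Str.lower f) = some 0 := by
          rw [h0]; decide
        have hfn : pvFirstM "name" (f :: t) = some f := by
          simp [pvFirstM, h0]
        by_cases hr : (0 : Int) < r
        · have hst : pvBStep (r, o) f = (0, some f) := by
            unfold pvBStep; rw [hi]; simp [hr]
          rw [hst, ih, hfn]
          norm_num [hr]
        · have hst : pvBStep (r, o) f = (r, o) := by
            unfold pvBStep; rw [hi]; simp [hr]
          have h1r : ¬ (1 : Int) < r := by omega
          have h2r : ¬ (2 : Int) < r := by omega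
          rw [hst, ih, hfn]
          norm_num [hr, h1r, h2r]
      · by_cases h1 : PySem.Str.lower f = "station_name"
        · have hi : PySem.List.index? pvCands (PySem.Str.lower f) = some 1 := by
            rw [h1]; decide
          have hfn : pvFirstM "name" (f :: t) = pvFirstM "name" t := by
            simp [pvFirstM, h0]
          have hfs : pvFirstM "station_name" (f :: t) = some f := by
            simp [pvFirstM, h1]
          have hft : pvFirstM "station" (f :: t) = pvFirstM "station" t := by
            simp [pvFirstM, h1]
          by_cases hr : (1 : Int) < r
          · have h0r : (0 : Int) < r := by omega
            have hst : pvBStep (r, o) f = (1, some f) := by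
              unfold pvBStep; rw [hi]; simp [hr]
            rw [hst, ih, hfn, hfs, hft]
            norm_num [hr, h0r]
          · have h2r : ¬ (2 : Int) < r := by omega
            have hst : pvBStep (r, o) f = (r, o) := by
              unfold pvBStep; rw [hi]; simp [hr]
            rw [hst, ih, hfn, hfs, hft]
            norm_num [hr, h2r]
        · by_cases h2 : PySem.Str.lower f = "station"
          · have hi : PySem.List.index? pvCands (PySem.Str.lower f) = some 2 := by
              rw [h2]; decide
            have hfn : pvFirstM "name" (f :: t) = pvFirstM "name" t := by
              simp [pvFirstM, h0]
            have hfs : pvFirstM "station_name" (f :: t) = pvFirstM "station_name" t := by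
              simp [pvFirstM, h1]
            have hft : pvFirstM "station" (f :: t) = some f := by
              simp [pvFirstM, h2]
            by_cases hr : (2 : Int) < r
            · have h0r : (0 : Int) < r := by omega
              have h1r : (1 : Int) < r := by omega
              have hst : pvBStep (r, o) f = (2, some f) := by
                unfold pvBStep; rw [hi]; simp [hr]
              rw [hst, ih, hfn, hfs, hft]
              norm_num [hr, h0r, h1r]
            · have hst : pvBStep (r, o) f = (r, o) := by
                unfold pvBStep; rw [hi]; simp [hr]
              rw [hst, ih, hfn, hfs, hft]
              norm_num [hr]
          · have hi : PySem.List.index? pvCands (PySem.Str.lower f) = none := by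
              rw [PySem.List.index?_eq_none_iff]
              simp [pvCands, h0, h1, h2]
            have hst : pvBStep (r, o) f = (r, o) := by
              unfold pvBStep; rw [hi]
            have hfn : pvFirstM "name" (f :: t) = pvFirstM "name" t := by
              simp [pvFirstM, h0]
            have hfs : pvFirstM "station_name" (f :: t) = pvFirstM "station_name" t := by
              simp [pvFirstM, h1]
            have hft : pvFirstM "station" (f :: t) = pvFirstM "station" t := by
              simp [pvFirstM, h2]
            rw [hst, ih, hfn, hfs, hft]

theorem pv_hasK_iff_isSome (k : String) (fs : List String) :
    pvHasK k fs ↔ (pvFirstM k fs).isSome := by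
  simp [pvFirstM, List.find?_isSome, pvHasK]

-- ===== VERDICT (by name: the statement is the Claim_ definition above) =====
theorem extract_station_name_field_py_spec : Claim_equal_extract_station_name_field_py := by
  intro hs _ hpre
  unfold Spec_extract_station_name_field_py extract_station_name_field_py extract_station_name_field_py_alt
  simp only [pv_get?_foldl_insert, pv_foldB, PySem.Dict.get?_empty]
  set fs := (hs.filter (fun h => h ≠ "")).map PySem.Str.strip with hfs
  have hfs' : pvFields hs = fs := rfl
  unfold Pre_extract_station_name_field_py at hpre
  rw [hfs'] at hpre
  rcases hpre with ⟨h, hu⟩ | ⟨hn, h, hu⟩ | ⟨hn, hsn, h, hu⟩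
  · have hsome := (pv_hasK_iff_isSome _ _).mp h
    rw [pv_last_eq_first _ _ hu]
    obtain ⟨w, hw⟩ := Option.isSome_iff_exists.mp hsome
    norm_num [hw, pvCands]
  · have hnone : pvFirstM "name" fs = none := (pv_first_none_iff _ _).mpr hn
    have hsome := (pv_hasK_iff_isSome _ _).mp h
    obtain ⟨w, hw⟩ := Option.isSome_iff_exists.mp hsome
    rw [pv_last_eq_first _ _ hu, (pv_last_none_iff "name" fs).mpr hn]
    norm_num [hnone, hw, pvCands]
  · have hnone : pvFirstM "name" fs = none := (pv_first_none_iff _ _).mpr hn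
    have hnone2 : pvFirstM "station_name" fs = none := (pv_first_none_iff _ _).mpr hsn
    have hsome := (pv_hasK_iff_isSome _ _).mp h
    obtain ⟨w, hw⟩ := Option.isSome_iff_exists.mp hsome
    rw [pv_last_eq_first _ _ hu, (pv_last_none_iff "name" fs).mpr hn,
        (pv_last_none_iff "station_name" fs).mpr hsn]
    norm_num [hnone, hnone2, hw, pvCands]
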